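-- pv_equiv track=rewrite | github.com/jamaliddins/Credit_card_-default-_analysis | credit_card.py | max_delay_streak
-- ===== SOURCE A (Python) =====
-- def max_delay_streak(row):
--     streak = max_streak = 0
--     for v in row:
--         if v >= 2:
--             streak += 1
--             max_streak = max(max_streak, streak)
--         else:
--             streak = 0
--     return max_streak
-- ===== SOURCE B (Python) =====
-- def max_delay_streak(row):
--     best = 0
--     i = 0
--     n = len(row)
--     while i < n:
--         if row[i] >= 2:
--             j = i + 1
--             while j < n and row[j] >= 2:
--                 j += 1
--             best = max(best, j - i)
--             i = j
--         else:
--             i += 1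
--     return best
-- ===== Notes on version B (the rewrite author's own statement) =====
-- stated objective: alternative
-- what changed: B splits the row into maximal runs of values >= 2 with an inner scan and takes the maximum run length, instead of A's per-element streak/max-streak accumulator update.
import Mathlib
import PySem

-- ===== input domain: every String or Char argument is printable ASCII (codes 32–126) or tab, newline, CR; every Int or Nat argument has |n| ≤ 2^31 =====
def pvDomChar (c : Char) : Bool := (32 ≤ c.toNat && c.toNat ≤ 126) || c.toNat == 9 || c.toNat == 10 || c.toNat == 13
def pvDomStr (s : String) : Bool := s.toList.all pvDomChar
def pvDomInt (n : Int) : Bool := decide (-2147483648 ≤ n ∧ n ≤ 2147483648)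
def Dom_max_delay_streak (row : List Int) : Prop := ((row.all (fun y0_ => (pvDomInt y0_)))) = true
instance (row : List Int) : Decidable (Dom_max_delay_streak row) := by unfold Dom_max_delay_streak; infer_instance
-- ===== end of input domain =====

-- B is an alternative, equally fast implementation: it scans each maximal run of
-- values >= 2 as a block and maximises over run lengths, instead of A's
-- per-element streak/max-streak accumulator; return values agree on all inputs.

-- ===== PORT A =====
-- A: fold over the row carrying (streak, max_streak).
def max_delay_streak (row : List Int) : Int :=
  (row.foldl
    (fun sm v => if 2 ≤ v then (sm.1 + 1, max sm.2 (sm.1 + 1)) else (0, sm.2))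
    ((0 : Int), (0 : Int))).2

-- ===== PORT B =====
-- B: outer loop over the row; on hitting a value >= 2, the inner scan (the
-- `while j < n and row[j] >= 2` loop = takeWhile/dropWhile on the remainder)
-- measures the whole run, the best is updated with the run length, and the
-- loop resumes after the run.
def bGo : List Int → Int → Int
  | [], best => best
  | v :: rest, best =>
    if 2 ≤ v then
      bGo (rest.dropWhile (fun x => decide (2 ≤ x)))
        (max best (1 + ((rest.takeWhile (fun x => decide (2 ≤ x))).length : Int)))
    else bGo rest best
termination_by l _ => l.length
decreasing_by
  · exact Nat.lt_succ_of_le (List.length_dropWhile_le _ _)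
  · exact Nat.lt_succ_self _

def max_delay_streak_alt (row : List Int) : Int := bGo row 0

-- ===== PRECONDITION & SPEC =====
def Spec_max_delay_streak (row : List Int) (out : Int) : Prop := out = max_delay_streak_alt row
instance (row : List Int) (out : Int) : Decidable (Spec_max_delay_streak row out) := by unfold Spec_max_delay_streak; infer_instance

-- ===== CLAIM (what is proved, stated in full; the proofs are below) =====
def Claim_equal_max_delay_streak : Prop := ∀ (row : List Int), Dom_max_delay_streak row → Spec_max_delay_streak row (max_delay_streak row)

-- ===== LEMMAS AND PROOFS =====

-- Proof-side characterisation: `pend l s` = the maximum streak of values ≥ 2 in l,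
-- with a pending streak of length s already running into l.
def pend : List Int → Int → Int
  | [], s => s
  | v :: rest, s => if 2 ≤ v then pend rest (s + 1) else max s (pend rest 0)

theorem pend_ge : ∀ (l : List Int) (s : Int), s ≤ pend l s := by
  intro l
  induction l with
  | nil => intro s; simp [pend]
  | cons v rest ih =>
    intro s
    simp only [pend]
    split
    · exact le_trans (by omega) (ih (s + 1))
    · exact le_max_left _ _

theorem pend_append_run : ∀ (t : List Int), (∀ x ∈ t, (2:Int) ≤ x) →
    ∀ (r : List Int) (s : Int), pend (t ++ r) s = pend r (s + t.length) := by
  intro t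
  induction t with
  | nil => intro _ r s; simp
  | cons v t ih =>
    intro h r s
    have hv : (2:Int) ≤ v := h v (by simp)
    simp only [List.cons_append, pend, if_pos hv]
    rw [ih (fun x hx => h x (by simp [hx])) r (s + 1)]
    congr 1
    simp only [List.length_cons]
    push_cast
    ring

-- A's fold equals `max m (pend row s)` whenever the invariant s ≤ m holds.
theorem foldA_eq : ∀ (row : List Int) (s m : Int), 0 ≤ s → s ≤ m →
    (row.foldl
      (fun sm v => if 2 ≤ v then (sm.1 + 1, max sm.2 (sm.1 + 1)) else (0, sm.2))
      (s, m)).2 = max m (pend row s) := by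
  intro row
  induction row with
  | nil => intro s m hs h; simp [pend]; omega
  | cons v rest ih =>
    intro s m hs h
    simp only [List.foldl_cons, pend]
    by_cases hv : (2:Int) ≤ v
    · rw [if_pos hv, if_pos hv]
      rw [ih (s + 1) (max m (s + 1)) (by omega) (le_max_right _ _)]
      have h1 : s + 1 ≤ pend rest (s + 1) := pend_ge _ _
      omega
    · rw [if_neg hv, if_neg hv]
      rw [ih 0 m le_rfl (by omega)]
      have h0 : (0:Int) ≤ pend rest 0 := pend_ge _ _
      omega

-- B's loop equals `max best (pend row 0)` whenever 0 ≤ best.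
theorem bGo_eq : ∀ (n : ℕ) (row : List Int), row.length ≤ n → ∀ (best : Int),
    0 ≤ best → bGo row best = max best (pend row 0) := by
  intro n
  induction n with
  | zero =>
    intro row hlen best hb
    have : row = [] := List.eq_nil_of_length_eq_zero (Nat.le_zero.mp hlen)
    subst this
    simp [bGo, pend]; omega
  | succ n ih =>
    intro row hlen best hb
    match row with
    | [] => simp [bGo, pend]; omega
    | v :: rest =>
      simp only [bGo, pend]
      by_cases hv : (2:Int) ≤ v
      · rw [if_pos hv, if_pos hv]
        have hrest := List.takeWhile_append_dropWhile (p := fun x => decide ((2:Int) ≤ x)) (l := rest)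
        have htall : ∀ x ∈ rest.takeWhile (fun x => decide ((2:Int) ≤ x)), (2:Int) ≤ x := by
          intro x hx; simpa using List.mem_takeWhile_imp hx
        have hlr : (rest.dropWhile (fun x => decide ((2:Int) ≤ x))).length ≤ n := by
          have h1 := List.length_dropWhile_le (p := fun x => decide ((2:Int) ≤ x)) (l := rest)
          simp only [List.length_cons] at hlen; omega
        have htl : (0:Int) ≤ ((rest.takeWhile (fun x => decide ((2:Int) ≤ x))).length : Int) := by
          positivity
        rw [ih _ hlr _ (by positivity)]
        have hpend : pend rest (0 + 1)
            = pend (rest.dropWhile (fun x => decide ((2:Int) ≤ x)))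
                (0 + 1 + ((rest.takeWhile (fun x => decide ((2:Int) ≤ x))).length : Int)) := by
          conv_lhs => rw [← hrest]
          exact pend_append_run _ htall _ _
        rw [hpend]
        have hhd := List.head?_dropWhile_not (p := fun x => decide ((2:Int) ≤ x)) (l := rest)
        cases hdw : rest.dropWhile (fun x => decide ((2:Int) ≤ x)) with
        | nil =>
          simp only [pend]
          omega
        | cons h r' =>
          rw [hdw] at hhd
          have hh : ¬ (2:Int) ≤ h := by simpa using hhd
          simp only [pend, if_neg hh]
          have h0 : (0:Int) ≤ pend r' 0 := pend_ge _ _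
          omega
      · rw [if_neg hv, if_neg hv]
        rw [ih rest (by simp only [List.length_cons] at hlen; omega) best hb]
        have h0 : (0:Int) ≤ pend rest 0 := pend_ge _ _
        omega

-- ===== VERDICT (by name: the statement is the Claim_ definition above) =====
theorem max_delay_streak_spec : Claim_equal_max_delay_streak := by
  intro row _
  unfold Spec_max_delay_streak max_delay_streak max_delay_streak_alt
  rw [foldA_eq row 0 0 le_rfl le_rfl, bGo_eq row.length row le_rfl 0 le_rfl]
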